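-- pv_equiv track=rewrite | github.com/tsh/dmoj_spoj | ecna16d.py | solve
-- ===== SOURCE A (Python) =====
-- from collections import deque, defaultdict
--
-- def solve(adj):
--     STEPS, COST = 0, 1
--     min_cost = {'English': (0,0)}
--     q = deque([('English', 0)])
--
--     while q:
--         cur, steps = q.popleft()
--         for nei, nei_cost in adj[cur]:
--             if nei not in min_cost:
--                 min_cost[nei] = (steps + 1, nei_cost)
--                 q.append((nei, steps+1))
--             if nei in min_cost and min_cost[nei][STEPS] >= steps + 1:
--                     min_cost[nei] = (steps+1, min(nei_cost, min_cost[nei][COST]))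
--     return min_cost
-- ===== SOURCE B (Python) =====
-- def solve(adj):
--     # Two-pass version: first a plain BFS records only distances, then a second
--     # pass aggregates, per node, the minimum cost over edges from the previous layer.
--     dist = {'English': 0}
--     q = ['English']
--     while q:
--         u = q.pop(0)
--         for v, _ in adj[u]:
--             if v not in dist:
--                 dist[v] = dist[u] + 1
--                 q.append(v)
--     min_cost = {'English': (0, 0)}
--     for u, du in dist.items():
--         for v, c in adj[u]:
--             if dist[v] == du + 1:
--                 if v in min_cost:
--                     min_cost[v] = (du + 1, min(c, min_cost[v][1]))
--                 else:
--                     min_cost[v] = (du + 1, c)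
--     return min_cost
-- ===== Notes on version B (the rewrite author's own statement) =====
-- stated objective: alternative
-- what changed: A interleaves min-edge-cost aggregation (two conditional dict updates per edge) inside the BFS loop; B first runs a plain BFS that records only distances, then a separate second pass over the visited nodes aggregates, for each node, the minimum cost among edges coming from the previous BFS layer.
import Mathlib
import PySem

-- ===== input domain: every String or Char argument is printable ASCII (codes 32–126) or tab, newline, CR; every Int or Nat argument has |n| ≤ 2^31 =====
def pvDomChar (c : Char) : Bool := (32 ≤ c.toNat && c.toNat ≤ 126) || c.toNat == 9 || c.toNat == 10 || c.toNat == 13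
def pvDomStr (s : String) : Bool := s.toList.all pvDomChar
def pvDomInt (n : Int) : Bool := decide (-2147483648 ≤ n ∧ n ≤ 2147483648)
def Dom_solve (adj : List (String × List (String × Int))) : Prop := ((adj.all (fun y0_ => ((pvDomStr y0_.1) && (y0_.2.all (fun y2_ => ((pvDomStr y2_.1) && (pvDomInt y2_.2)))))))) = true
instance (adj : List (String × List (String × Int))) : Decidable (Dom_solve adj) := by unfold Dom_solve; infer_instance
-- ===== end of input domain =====

-- B separates A's interleaved BFS into a distance-only BFS plus a second
-- aggregation pass over the visited nodes (same return value; no speed claim).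

-- ===== PORT A =====
-- termination infrastructure shared by both BFS loops (cited by decreasing_by)
def pvUniv (d : PySem.Dict String (List (String × Int))) : List String :=
  (d.items.flatMap (fun p => p.2.map Prod.fst)).dedup

def pvCnt {ν : Type} (U : List String) (m : PySem.Dict String ν) : Nat :=
  (U.filter (fun v => !(m.contains v))).length

theorem pvCnt_insert_contains {ν : Type} (U : List String) (m : PySem.Dict String ν)
    (k : String) (v : ν) (h : m.contains k = true) :
    pvCnt U (m.insert k v) = pvCnt U m := by
  unfold pvCnt
  congr 1
  apply List.filter_congr
  intro w _
  rw [PySem.Dict.contains_insert]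
  by_cases hw : w = k
  · subst hw; simp [h]
  · simp [hw]

theorem pvCnt_insert_fresh {ν : Type} (U : List String) (m : PySem.Dict String ν)
    (k : String) (v : ν) (h : m.contains k = false) (hk : k ∈ U) (hnd : U.Nodup) :
    pvCnt U (m.insert k v) + 1 = pvCnt U m := by
  unfold pvCnt
  induction U with
  | nil => cases hk
  | cons a U ih =>
    rcases List.nodup_cons.mp hnd with ⟨ha, hndU⟩
    rcases List.mem_cons.mp hk with rfl | hk'
    · -- head is k
      have h1 : ((m.insert k v).contains k) = true := PySem.Dict.contains_insert_self m k v
      have hcong : ∀ w ∈ U, (!(m.insert k v).contains w) = (!m.contains w) := by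
        intro w hw
        rw [PySem.Dict.contains_insert]
        have : w ≠ k := fun hwk => ha (hwk ▸ hw)
        simp [this]
      rw [List.filter_cons, List.filter_cons, List.filter_congr hcong]
      simp only [h1, h, Bool.not_true, Bool.not_false]
      simp only [Bool.false_eq_true, if_false, if_true, List.length_cons]
    · have hak : a ≠ k := fun hha => ha (hha ▸ hk')
      have heq : (!(m.insert k v).contains a) = (!m.contains a) := by
        rw [PySem.Dict.contains_insert]; simp [hak]
      have := ih hk' hndU
      simp only [List.filter_cons, heq]
      by_cases hma : (!m.contains a) = true
      · simp only [if_pos hma, List.length_cons]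
        omega
      · simp only [if_neg hma]
        omega

def pvMemUniv (d : PySem.Dict String (List (String × Int))) (cur : String) :
    ∀ e ∈ d.getD cur [], e.1 ∈ pvUniv d := by
  intro e he
  rw [PySem.Dict.getD_eq_get?_getD] at he
  unfold pvUniv
  rw [List.mem_dedup]
  cases hg : PySem.Dict.get? d cur with
  | none => rw [hg] at he; cases he
  | some l =>
    rw [hg] at he
    simp only [Option.getD_some] at he
    have hmem : (cur, l) ∈ d.items := by
      unfold PySem.Dict.get? at hg
      rcases Option.map_eq_some_iff.mp hg with ⟨p, hp, hpl⟩
      have := List.mem_of_find?_eq_some hp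
      have heq := List.find?_some hp
      rcases p with ⟨pk, pv⟩
      simp only at hpl heq
      subst hpl
      have : pk = cur := by simpa using heq
      subst this; exact List.mem_of_find?_eq_some hp
    exact List.mem_flatMap.mpr ⟨(cur, l), hmem, List.mem_map.mpr ⟨e, he, rfl⟩⟩

-- one edge of A's loop body (the two sequential ifs of the Python)
def solveEdgeA2 (steps : Int)
    (r : PySem.Dict String (Int × Int) × List (String × Int)) (e : String × Int) :
    PySem.Dict String (Int × Int) × List (String × Int) :=
  match r.1.get? e.1 with
  | some p =>
      if steps + 1 ≤ p.1 then (r.1.insert e.1 (steps + 1, min e.2 p.2), r.2)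
      else r
  | none => r

def solveEdgeA (steps : Int)
    (st : PySem.Dict String (Int × Int) × List (String × Int)) (e : String × Int) :
    PySem.Dict String (Int × Int) × List (String × Int) :=
  solveEdgeA2 steps
    (if st.1.contains e.1 then st
     else (st.1.insert e.1 (steps + 1, e.2), st.2 ++ [(e.1, steps + 1)])) e

theorem pvEdgeA2_bound (U : List String) (s : Int)
    (r : PySem.Dict String (Int × Int) × List (String × Int)) (e : String × Int) :
    2 * pvCnt U (solveEdgeA2 s r e).1 + (solveEdgeA2 s r e).2.length ≤
      2 * pvCnt U r.1 + r.2.length := by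
  unfold solveEdgeA2
  cases hg : r.1.get? e.1 with
  | none => exact le_refl _
  | some p =>
    dsimp only
    have hc : r.1.contains e.1 = true := by
      rw [PySem.Dict.contains_eq_isSome_get?, hg]; rfl
    by_cases hle : s + 1 ≤ p.1
    · rw [if_pos hle]
      simp only
      rw [pvCnt_insert_contains _ _ _ _ hc]
    · rw [if_neg hle]

theorem pvEdgeA_bound (U : List String) (s : Int)
    (st : PySem.Dict String (Int × Int) × List (String × Int)) (e : String × Int)
    (he : e.1 ∈ U) (hnd : U.Nodup) :
    2 * pvCnt U (solveEdgeA s st e).1 + (solveEdgeA s st e).2.length ≤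
      2 * pvCnt U st.1 + st.2.length := by
  unfold solveEdgeA
  by_cases hc : st.1.contains e.1 = true
  · rw [if_pos hc]
    exact pvEdgeA2_bound U s st e
  · simp only [Bool.not_eq_true] at hc
    rw [if_neg (by simp [hc])]
    have h1 := pvCnt_insert_fresh U st.1 e.1 (s + 1, e.2) hc he hnd
    have h2 := pvEdgeA2_bound U s (st.1.insert e.1 (s + 1, e.2), st.2 ++ [(e.1, s + 1)]) e
    simp only [List.length_append, List.length_cons, List.length_nil] at h2 ⊢
    omega

theorem pvFoldA_bound (U : List String) (s : Int) (es : List (String × Int))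
    (st : PySem.Dict String (Int × Int) × List (String × Int))
    (hU : ∀ e ∈ es, e.1 ∈ U) (hnd : U.Nodup) :
    2 * pvCnt U (es.foldl (solveEdgeA s) st).1 + (es.foldl (solveEdgeA s) st).2.length ≤
      2 * pvCnt U st.1 + st.2.length := by
  induction es generalizing st with
  | nil => simp
  | cons e es ih =>
    simp only [List.foldl_cons]
    have h1 := ih (solveEdgeA s st e) (fun x hx => hU x (List.mem_cons_of_mem e hx))
    have h2 := pvEdgeA_bound U s st e (hU e (List.mem_cons_self)) hnd
    omega

-- A's BFS loop: pops (cur, steps), processes adj[cur], appends the discoveries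
def solveLoop (d : PySem.Dict String (List (String × Int)))
    (q : List (String × Int)) (mc : PySem.Dict String (Int × Int)) :
    PySem.Dict String (Int × Int) :=
  match q with
  | [] => mc
  | (cur, steps) :: qt =>
    let r := (d.getD cur []).foldl (solveEdgeA steps) (mc, [])
    solveLoop d (qt ++ r.2) r.1
termination_by 2 * pvCnt (pvUniv d) mc + q.length
decreasing_by
  have := pvFoldA_bound (pvUniv d) steps (d.getD cur []) (mc, [])
    (pvMemUniv d cur) (List.nodup_dedup _)
  simp only [List.length_append, List.length_cons, List.length_nil] at *
  omega

-- adj is a Python dict; missing-key access (KeyError) is excluded by Pre_solve,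
-- so the getD [] totalization below is exact on the admitted inputs.
def solve (adj : List (String × List (String × Int))) : List (String × Int × Int) :=
  let d := PySem.Dict.ofList adj
  (solveLoop d [("English", 0)] (PySem.Dict.ofList [("English", (0, 0))])).items

-- ===== PORT B =====
-- one edge of B's distance-only BFS
def bfsEdge (du : Int) (st : PySem.Dict String Int × List String) (e : String × Int) :
    PySem.Dict String Int × List String :=
  if st.1.contains e.1 then st else (st.1.insert e.1 (du + 1), st.2 ++ [e.1])

theorem pvFoldB_bound (U : List String) (du : Int) (es : List (String × Int))
    (st : PySem.Dict String Int × List String)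
    (hU : ∀ e ∈ es, e.1 ∈ U) (hnd : U.Nodup) :
    2 * pvCnt U (es.foldl (bfsEdge du) st).1 + (es.foldl (bfsEdge du) st).2.length ≤
      2 * pvCnt U st.1 + st.2.length := by
  induction es generalizing st with
  | nil => simp
  | cons e es ih =>
    simp only [List.foldl_cons]
    have h1 := ih (bfsEdge du st e) (fun x hx => hU x (List.mem_cons_of_mem e hx))
    have h2 : 2 * pvCnt U (bfsEdge du st e).1 + (bfsEdge du st e).2.length ≤
        2 * pvCnt U st.1 + st.2.length := by
      unfold bfsEdge
      by_cases hc : st.1.contains e.1 = true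
      · rw [if_pos hc]
      · rw [if_neg hc]
        simp only [Bool.not_eq_true] at hc
        have := pvCnt_insert_fresh U st.1 e.1 (du + 1) hc (hU e List.mem_cons_self) hnd
        simp only [List.length_append, List.length_cons, List.length_nil]
        omega
    omega

-- B's distance-only BFS loop
def bfsLoop (d : PySem.Dict String (List (String × Int)))
    (q : List String) (dist : PySem.Dict String Int) : PySem.Dict String Int :=
  match q with
  | [] => dist
  | u :: qt =>
    let r := (d.getD u []).foldl (bfsEdge (dist.getD u 0)) (dist, [])
    bfsLoop d (qt ++ r.2) r.1
termination_by 2 * pvCnt (pvUniv d) dist + q.length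
decreasing_by
  have := pvFoldB_bound (pvUniv d) (dist.getD u 0) (d.getD u []) (dist, [])
    (pvMemUniv d u) (List.nodup_dedup _)
  simp only [List.length_append, List.length_cons, List.length_nil] at *
  omega

-- one edge of B's aggregation pass
def aggEdge (dist : PySem.Dict String Int) (du : Int)
    (mc : PySem.Dict String (Int × Int)) (e : String × Int) :
    PySem.Dict String (Int × Int) :=
  if dist.getD e.1 0 = du + 1 then
    match mc.get? e.1 with
    | some p => mc.insert e.1 (du + 1, min e.2 p.2)
    | none => mc.insert e.1 (du + 1, e.2)
  else mc

-- B: distance-only BFS, then a second pass over the visited nodes (dist lookups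
-- inside the second pass are total via getD; exact under Pre_solve).
def solve_alt (adj : List (String × List (String × Int))) : List (String × Int × Int) :=
  let d := PySem.Dict.ofList adj
  let dist := bfsLoop d ["English"] (PySem.Dict.ofList [("English", 0)])
  (dist.items.foldl
    (fun m it => (d.getD it.1 []).foldl (aggEdge dist it.2) m)
    (PySem.Dict.ofList [("English", (0, 0))])).items

-- ===== PRECONDITION & SPEC =====
-- one expansion step of the reachable-name set (non-keys contribute nothing)
def pvStep (d : PySem.Dict String (List (String × Int))) (S : List String) : List String :=
  (S ++ S.flatMap (fun u => (d.getD u []).map Prod.fst)).dedup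

-- all names reachable from 'English' through keys of the dict (closure is
-- reached within size+1 steps)
def pvReach (d : PySem.Dict String (List (String × Int))) : List String :=
  (pvStep d)^[d.size + 1] ["English"]

-- Pre_ excludes exactly the inputs on which A raises KeyError: some name
-- reachable from 'English' (including 'English' itself) is not a key of adj.
def Pre_solve (adj : List (String × List (String × Int))) : Prop :=
  ∀ v ∈ pvReach (PySem.Dict.ofList adj), (PySem.Dict.ofList adj).contains v = true
instance (adj : List (String × List (String × Int))) : Decidable (Pre_solve adj) := by
  unfold Pre_solve; infer_instance

def pvWitness_solve : (List (String × List (String × Int))) :=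
  [("English", [("French", 3), ("German", 2)]), ("French", [("English", 1), ("German", 7)]),
   ("German", [])]

def Spec_solve (adj : List (String × List (String × Int))) (out : List (String × Int × Int)) : Prop := out = solve_alt adj
instance (adj : List (String × List (String × Int))) (out : List (String × Int × Int)) : Decidable (Spec_solve adj out) := by unfold Spec_solve; infer_instance

-- ===== CLAIM (what is proved, stated in full; the proofs are below) =====
def Claim_equal_solve : Prop := ∀ (adj : List (String × List (String × Int))), Dom_solve adj → Pre_solve adj → Spec_solve adj (solve adj)

-- ===== LEMMAS AND PROOFS =====

-- characterization of one node's distance-BFS fold: it appends the fresh nodes ns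
theorem bfsFold_char (du : Int) (es : List (String × Int)) :
    ∀ (dist : PySem.Dict String Int) (app : List String),
    ∃ ns : List String,
      (es.foldl (bfsEdge du) (dist, app)).2 = app ++ ns ∧
      (es.foldl (bfsEdge du) (dist, app)).1.items = dist.items ++ ns.map (fun v => (v, du + 1)) ∧
      (∀ v ∈ ns, dist.contains v = false) ∧
      (∀ v ∈ ns, (es.foldl (bfsEdge du) (dist, app)).1.get? v = some (du + 1)) ∧
      (∀ v o, dist.get? v = some o → (es.foldl (bfsEdge du) (dist, app)).1.get? v = some o) ∧
      (∀ v o, (es.foldl (bfsEdge du) (dist, app)).1.get? v = some o →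
        dist.get? v = some o ∨ o = du + 1) := by
  induction es with
  | nil =>
    intro dist app
    exact ⟨[], by simp, by simp, by simp, by simp, fun v o h => h, fun v o h => Or.inl h⟩
  | cons e es ih =>
    intro dist app
    simp only [List.foldl_cons]
    by_cases hc : dist.contains e.1 = true
    · have hstep : bfsEdge du (dist, app) e = (dist, app) := by
        unfold bfsEdge; rw [if_pos hc]
      rw [hstep]
      exact ih dist app
    · have hcf : dist.contains e.1 = false := by simpa using hc
      have hstep : bfsEdge du (dist, app) e = (dist.insert e.1 (du + 1), app ++ [e.1]) := by
        unfold bfsEdge; rw [if_neg hc]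
      rw [hstep]
      obtain ⟨ns, h1, h2, h3, h4, h5, h6⟩ := ih (dist.insert e.1 (du + 1)) (app ++ [e.1])
      refine ⟨e.1 :: ns, ?_, ?_, ?_, ?_, ?_, ?_⟩
      · rw [h1, List.append_assoc]; rfl
      · rw [h2, PySem.Dict.items_insert_of_not_contains _ _ hcf, List.append_assoc]; rfl
      · intro v hv
        rcases List.mem_cons.mp hv with rfl | hv'
        · exact hcf
        · have := h3 v hv'
          rw [PySem.Dict.contains_insert] at this
          exact Bool.or_eq_false_iff.mp this |>.2
      · intro v hv
        rcases List.mem_cons.mp hv with rfl | hv'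
        · exact h5 e.1 (du + 1) (PySem.Dict.get?_insert_self _ _ _)
        · exact h4 v hv'
      · intro v o hv
        have hvne : v ≠ e.1 := by
          rintro rfl
          rw [PySem.Dict.contains_eq_isSome_get?, hv] at hcf
          cases hcf
        exact h5 v o (by rw [PySem.Dict.get?_insert_of_ne dist (du + 1) hvne]; exact hv)
      · intro v o hv
        rcases h6 v o hv with h | h
        · by_cases hvne : v = e.1
          · subst hvne
            rw [PySem.Dict.get?_insert_self] at h
            exact Or.inr (Option.some.inj h).symm
          · rw [PySem.Dict.get?_insert_of_ne dist (du + 1) hvne] at h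
            exact Or.inl h
        · exact Or.inr h

-- the final BFS dict extends-- the final BFS dict extends any intermediate state (items prefix and lookups)
theorem bfsLoop_ext (d : PySem.Dict String (List (String × Int))) :
    ∀ (q : List String) (dist : PySem.Dict String Int),
      (∃ rest, (bfsLoop d q dist).items = dist.items ++ rest) ∧
      (∀ v o, dist.get? v = some o → (bfsLoop d q dist).get? v = some o) := by
  intro q dist
  induction q, dist using bfsLoop.induct d with
  | case1 dist =>
    rw [bfsLoop]
    exact ⟨⟨[], (List.append_nil _).symm⟩, fun v o h => h⟩
  | case2 dist u qt r ih =>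
    rw [bfsLoop]
    obtain ⟨ns, h1, h2, h3, h4, h5, h6⟩ :=
      bfsFold_char (dist.getD u 0) (d.getD u []) dist []
    obtain ⟨rest, hrest⟩ := ih.1
    have hmono := ih.2
    refine ⟨⟨ns.map (fun v => (v, dist.getD u 0 + 1)) ++ rest, ?_⟩, ?_⟩
    · rw [hrest, h2, List.append_assoc]
    · intro v o h
      exact hmono v o (h5 v o h)

-- joint per-node lemma: A's interleaved edge fold equals B's aggregation edge fold,
-- and the two BFS frontiers stay in lockstep
theorem joint_fold (F : PySem.Dict String Int) (du : Int) :
    ∀ (es : List (String × Int)) (mc : PySem.Dict String (Int × Int))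
      (dist : PySem.Dict String Int) (appB : List String),
      (∀ v, mc.contains v = dist.contains v) →
      (∀ v p, mc.get? v = some p → dist.get? v = some p.1) →
      (∀ v o, dist.get? v = some o → o ≤ du + 1) →
      (∀ v o, (es.foldl (bfsEdge du) (dist, appB)).1.get? v = some o → F.get? v = some o) →
      es.foldl (aggEdge F du) mc =
        (es.foldl (solveEdgeA du) (mc, appB.map (fun v => (v, du + 1)))).1 ∧
      (es.foldl (solveEdgeA du) (mc, appB.map (fun v => (v, du + 1)))).2 =
        ((es.foldl (bfsEdge du) (dist, appB)).2).map (fun v => (v, du + 1)) ∧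
      (∀ v, (es.foldl (solveEdgeA du) (mc, appB.map (fun v => (v, du + 1)))).1.contains v =
        (es.foldl (bfsEdge du) (dist, appB)).1.contains v) ∧
      (∀ v p, (es.foldl (solveEdgeA du) (mc, appB.map (fun v => (v, du + 1)))).1.get? v = some p →
        (es.foldl (bfsEdge du) (dist, appB)).1.get? v = some p.1) := by
  intro es
  induction es with
  | nil =>
    intro mc dist appB hJ1 hJ2 hJ3 hJF
    exact ⟨rfl, rfl, hJ1, hJ2⟩
  | cons e es ih =>
    intro mc dist appB hJ1 hJ2 hJ3 hJF
    simp only [List.foldl_cons] at hJF ⊢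
    by_cases hcv : mc.contains e.1 = true
    · -- already discovered
      have hdv : dist.contains e.1 = true := by rw [← hJ1]; exact hcv
      have hBstep : bfsEdge du (dist, appB) e = (dist, appB) := by
        unfold bfsEdge; rw [if_pos hdv]
      rw [hBstep] at hJF ⊢
      obtain ⟨p, hp⟩ : ∃ p, mc.get? e.1 = some p := by
        rw [PySem.Dict.contains_eq_isSome_get?] at hcv
        exact Option.isSome_iff_exists.mp hcv
      have hdp : dist.get? e.1 = some p.1 := hJ2 _ _ hp
      have hple : p.1 ≤ du + 1 := hJ3 _ _ hdp
      obtain ⟨ns, h1, h2, h3, h4, h5, h6⟩ := bfsFold_char du es dist appB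
      have hFv : F.get? e.1 = some p.1 := hJF _ _ (h5 _ _ hdp)
      have hFvD : F.getD e.1 0 = p.1 := by
        rw [PySem.Dict.getD_eq_get?_getD, hFv]; rfl
      have hAstep : solveEdgeA du (mc, appB.map (fun v => (v, du + 1))) e =
          (if du + 1 ≤ p.1 then mc.insert e.1 (du + 1, min e.2 p.2) else mc,
            appB.map (fun v => (v, du + 1))) := by
        unfold solveEdgeA
        rw [if_pos hcv]
        unfold solveEdgeA2
        simp only [hp]
        by_cases hle : du + 1 ≤ p.1
        · rw [if_pos hle, if_pos hle]
        · rw [if_neg hle, if_neg hle]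
      by_cases hpd : p.1 = du + 1
      · -- this edge comes from the previous layer: both sides take the min
        have hAstep' : solveEdgeA du (mc, appB.map (fun v => (v, du + 1))) e =
            (mc.insert e.1 (du + 1, min e.2 p.2), appB.map (fun v => (v, du + 1))) := by
          rw [hAstep, if_pos (le_of_eq hpd.symm)]
        have hCstep : aggEdge F du mc e = mc.insert e.1 (du + 1, min e.2 p.2) := by
          unfold aggEdge
          rw [if_pos (by rw [hFvD, hpd]), hp]
        rw [hAstep', hCstep]
        refine ih (mc.insert e.1 (du + 1, min e.2 p.2)) dist appB ?_ ?_ hJ3 hJF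
        · intro w
          by_cases hw : w = e.1
          · subst hw
            rw [PySem.Dict.contains_insert_self, hdv]
          · rw [PySem.Dict.contains_insert, beq_eq_false_iff_ne.mpr hw, Bool.false_or]
            exact hJ1 w
        · intro w pw hw
          by_cases hww : w = e.1
          · subst hww
            rw [PySem.Dict.get?_insert_self] at hw
            cases hw
            rw [hdp, hpd]
          · rw [PySem.Dict.get?_insert_of_ne mc _ hww] at hw
            exact hJ2 w pw hw
      · -- stale edge (target is in an earlier or the same layer): both sides skip
        have hplt : ¬ (du + 1 ≤ p.1) := by omega
        have hAstep' : solveEdgeA du (mc, appB.map (fun v => (v, du + 1))) e =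
            (mc, appB.map (fun v => (v, du + 1))) := by
          rw [hAstep, if_neg hplt]
        have hCstep : aggEdge F du mc e = mc := by
          unfold aggEdge
          rw [if_neg (by rw [hFvD]; exact hpd)]
        rw [hAstep', hCstep]
        exact ih mc dist appB hJ1 hJ2 hJ3 hJF
    · -- fresh node: A discovers and then min's with itself; B discovers, agg inserts
      have hcvf : mc.contains e.1 = false := by simpa using hcv
      have hdv : dist.contains e.1 = false := by rw [← hJ1]; exact hcvf
      have hBstep : bfsEdge du (dist, appB) e = (dist.insert e.1 (du + 1), appB ++ [e.1]) := by
        unfold bfsEdge; rw [if_neg (by simp [hdv])]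
      rw [hBstep] at hJF ⊢
      have hAstep : solveEdgeA du (mc, appB.map (fun v => (v, du + 1))) e =
          (mc.insert e.1 (du + 1, e.2), (appB ++ [e.1]).map (fun v => (v, du + 1))) := by
        unfold solveEdgeA
        rw [if_neg (by simp [hcvf])]
        unfold solveEdgeA2
        simp only [PySem.Dict.get?_insert_self]
        rw [if_pos (le_refl _), PySem.Dict.insert_insert_self, min_self, List.map_append]
        rfl
      obtain ⟨ns, h1, h2, h3, h4, h5, h6⟩ :=
        bfsFold_char du es (dist.insert e.1 (du + 1)) (appB ++ [e.1])
      have hFv : F.get? e.1 = some (du + 1) :=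
        hJF _ _ (h5 _ _ (PySem.Dict.get?_insert_self _ _ _))
      have hCstep : aggEdge F du mc e = mc.insert e.1 (du + 1, e.2) := by
        unfold aggEdge
        rw [if_pos (by rw [PySem.Dict.getD_eq_get?_getD, hFv]; rfl),
          (PySem.Dict.get?_eq_none_iff_contains mc e.1).mpr hcvf]
      rw [hAstep, hCstep]
      refine ih (mc.insert e.1 (du + 1, e.2)) (dist.insert e.1 (du + 1)) (appB ++ [e.1])
        ?_ ?_ ?_ hJF
      · intro w
        by_cases hw : w = e.1
        · subst hw
          rw [PySem.Dict.contains_insert_self, PySem.Dict.contains_insert_self]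
        · rw [PySem.Dict.contains_insert, PySem.Dict.contains_insert,
            beq_eq_false_iff_ne.mpr hw, Bool.false_or, Bool.false_or]
          exact hJ1 w
      · intro w pw hw
        by_cases hww : w = e.1
        · subst hww
          rw [PySem.Dict.get?_insert_self] at hw
          cases hw
          rw [PySem.Dict.get?_insert_self]
        · rw [PySem.Dict.get?_insert_of_ne mc _ hww] at hw
          rw [PySem.Dict.get?_insert_of_ne dist _ hww]
          exact hJ2 w pw hw
      · intro w o hw
        by_cases hww : w = e.1
        · subst hww
          rw [PySem.Dict.get?_insert_self] at hw
          cases hw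
          omega
        · rw [PySem.Dict.get?_insert_of_ne dist _ hww] at hw
          exact hJ3 w o hw

-- main simulation: A's loop from a mid-BFS state equals B's aggregation of the
-- remaining stream (queue nodes plus the nodes the BFS will still discover)
theorem main_sim (d : PySem.Dict String (List (String × Int))) :
    ∀ (n : Nat) (q : List String) (dist : PySem.Dict String Int)
      (mc : PySem.Dict String (Int × Int)),
      2 * pvCnt (pvUniv d) dist + q.length ≤ n →
      (∀ v, mc.contains v = dist.contains v) →
      (∀ v p, mc.get? v = some p → dist.get? v = some p.1) →
      (∀ v ∈ q, dist.contains v = true) →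
      List.Pairwise (fun a b => dist.getD a 0 ≤ dist.getD b 0) q →
      (∀ u0, q.head? = some u0 → ∀ v o, dist.get? v = some o → o ≤ dist.getD u0 0 + 1) →
      solveLoop d (q.map (fun u => (u, dist.getD u 0))) mc =
        ((q.map (fun u => (u, dist.getD u 0))) ++ (bfsLoop d q dist).items.drop dist.size).foldl
          (fun m it => (d.getD it.1 []).foldl (aggEdge (bfsLoop d q dist) it.2) m) mc := by
  intro n
  induction n with
  | zero =>
    intro q dist mc hm _ _ _ _ _
    have hq : q = [] := by
      cases q with
      | nil => rfl
      | cons a t => simp [List.length_cons] at hm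
    subst hq
    rw [List.map_nil, solveLoop, bfsLoop]
    have hdrop : dist.items.drop dist.size = [] := List.drop_length
    rw [hdrop]
    rfl
  | succ n ihn =>
    intro q dist mc hm hK1 hK2 hK3 hK4 hK5
    cases q with
    | nil =>
      rw [List.map_nil, solveLoop, bfsLoop]
      have hdrop : dist.items.drop dist.size = [] := List.drop_length
      rw [hdrop]
      rfl
    | cons u qt =>
      have hu : dist.contains u = true := hK3 u List.mem_cons_self
      have hbnd : ∀ v o, dist.get? v = some o → o ≤ dist.getD u 0 + 1 := hK5 u rfl
      obtain ⟨ns, h1, h2, h3, h4, h5, h6⟩ :=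
        bfsFold_char (dist.getD u 0) (d.getD u []) dist []
      have h1' : ((d.getD u []).foldl (bfsEdge (dist.getD u 0)) (dist, [])).2 = ns := by
        simpa using h1
      have hFeq : bfsLoop d (u :: qt) dist =
          bfsLoop d (qt ++ ns) ((d.getD u []).foldl (bfsEdge (dist.getD u 0)) (dist, [])).1 := by
        rw [bfsLoop, h1']
      have hJF : ∀ v o,
          ((d.getD u []).foldl (bfsEdge (dist.getD u 0)) (dist, [])).1.get? v = some o →
          (bfsLoop d (u :: qt) dist).get? v = some o := by
        intro v o h
        rw [hFeq]
        exact (bfsLoop_ext d (qt ++ ns) _).2 v o h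
      obtain ⟨hG1, hG2, hG3, hG4⟩ :=
        joint_fold (bfsLoop d (u :: qt) dist) (dist.getD u 0) (d.getD u []) mc dist []
          hK1 hK2 hbnd hJF
      -- facts about the post-fold distance dict
      have hpres : ∀ v, dist.contains v = true →
          ((d.getD u []).foldl (bfsEdge (dist.getD u 0)) (dist, [])).1.getD v 0 = dist.getD v 0 ∧
          ((d.getD u []).foldl (bfsEdge (dist.getD u 0)) (dist, [])).1.contains v = true := by
        intro v hv
        rw [PySem.Dict.contains_eq_isSome_get?] at hv
        obtain ⟨o, ho⟩ := Option.isSome_iff_exists.mp hv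
        have h5o := h5 v o ho
        refine ⟨?_, ?_⟩
        · rw [PySem.Dict.getD_eq_get?_getD _ v 0, PySem.Dict.getD_eq_get?_getD _ v 0, h5o, ho]
        · rw [PySem.Dict.contains_eq_isSome_get?, h5o]; rfl
      have hnsv : ∀ v ∈ ns,
          ((d.getD u []).foldl (bfsEdge (dist.getD u 0)) (dist, [])).1.getD v 0 =
            dist.getD u 0 + 1 ∧
          ((d.getD u []).foldl (bfsEdge (dist.getD u 0)) (dist, [])).1.contains v = true := by
        intro v hv
        refine ⟨?_, ?_⟩
        · rw [PySem.Dict.getD_eq_get?_getD _ v 0, h4 v hv]; rfl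
        · rw [PySem.Dict.contains_eq_isSome_get?, h4 v hv]; rfl
      have hboundD : ∀ v, dist.contains v = true → dist.getD v 0 ≤ dist.getD u 0 + 1 := by
        intro v hv
        rw [PySem.Dict.contains_eq_isSome_get?] at hv
        obtain ⟨o, ho⟩ := Option.isSome_iff_exists.mp hv
        rw [PySem.Dict.getD_eq_get?_getD _ v 0, ho]
        exact hbnd v o ho
      -- the queue rewrite
      have hqmap : qt.map (fun v => (v, dist.getD v 0)) =
          qt.map (fun v => (v,
            ((d.getD u []).foldl (bfsEdge (dist.getD u 0)) (dist, [])).1.getD v 0)) :=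
        List.map_congr_left (fun v hv => by
          rw [(hpres v (hK3 v (List.mem_cons_of_mem u hv))).1])
      have hnsmap : ns.map (fun v => (v, dist.getD u 0 + 1)) =
          ns.map (fun v => (v,
            ((d.getD u []).foldl (bfsEdge (dist.getD u 0)) (dist, [])).1.getD v 0)) :=
        List.map_congr_left (fun v hv => by rw [(hnsv v hv).1])
      -- invariants for the tail call
      have hK3' : ∀ v ∈ qt ++ ns,
          ((d.getD u []).foldl (bfsEdge (dist.getD u 0)) (dist, [])).1.contains v = true := by
        intro v hv
        rcases List.mem_append.mp hv with hv | hv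
        · exact (hpres v (hK3 v (List.mem_cons_of_mem u hv))).2
        · exact (hnsv v hv).2
      have hK4' : List.Pairwise (fun a b =>
          ((d.getD u []).foldl (bfsEdge (dist.getD u 0)) (dist, [])).1.getD a 0 ≤
          ((d.getD u []).foldl (bfsEdge (dist.getD u 0)) (dist, [])).1.getD b 0) (qt ++ ns) := by
        rw [List.pairwise_append]
        refine ⟨?_, ?_, ?_⟩
        · exact ((List.pairwise_cons.mp hK4).2).imp_of_mem (fun {a b} ha hb hab => by
            rw [(hpres a (hK3 a (List.mem_cons_of_mem u ha))).1,
              (hpres b (hK3 b (List.mem_cons_of_mem u hb))).1]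
            exact hab)
        · exact List.pairwise_of_forall_mem_list (fun a ha b hb => by
            rw [(hnsv a ha).1, (hnsv b hb).1])
        · intro a ha b hb
          rw [(hpres a (hK3 a (List.mem_cons_of_mem u ha))).1, (hnsv b hb).1]
          exact hboundD a (hK3 a (List.mem_cons_of_mem u ha))
      have hK5' : ∀ u0, (qt ++ ns).head? = some u0 → ∀ v o,
          ((d.getD u []).foldl (bfsEdge (dist.getD u 0)) (dist, [])).1.get? v = some o →
          o ≤ ((d.getD u []).foldl (bfsEdge (dist.getD u 0)) (dist, [])).1.getD u0 0 + 1 := by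
        intro u0 hu0 v o hvo
        have ho : o ≤ dist.getD u 0 + 1 := by
          rcases h6 v o hvo with h | h
          · exact hbnd v o h
          · omega
        have hdu : dist.getD u 0 ≤
            ((d.getD u []).foldl (bfsEdge (dist.getD u 0)) (dist, [])).1.getD u0 0 := by
          cases qt with
          | cons h t =>
            have : u0 = h := by
              simp only [List.cons_append, List.head?_cons, Option.some.injEq] at hu0
              exact hu0.symm
            subst this
            rw [(hpres u0 (hK3 u0 (List.mem_cons_of_mem u List.mem_cons_self))).1]
            exact (List.pairwise_cons.mp hK4).1 u0 List.mem_cons_self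
          | nil =>
            cases ns with
            | nil => cases hu0
            | cons b t =>
              have : u0 = b := by
                simp only [List.nil_append, List.head?_cons, Option.some.injEq] at hu0
                exact hu0.symm
              subst this
              rw [(hnsv u0 List.mem_cons_self).1]
              omega
        omega
      have hmeas : 2 * pvCnt (pvUniv d)
          ((d.getD u []).foldl (bfsEdge (dist.getD u 0)) (dist, [])).1 + (qt ++ ns).length ≤ n := by
        have hfb := pvFoldB_bound (pvUniv d) (dist.getD u 0) (d.getD u []) (dist, [])
          (pvMemUniv d u) (List.nodup_dedup _)
        rw [h1'] at hfb
        simp only [List.length_append, List.length_cons, List.length_nil] at hfb hm ⊢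
        omega
      simp only [List.map_nil] at hG1 hG2 hG3 hG4
      rw [h1'] at hG2
      have hIH := ihn (qt ++ ns)
        ((d.getD u []).foldl (bfsEdge (dist.getD u 0)) (dist, [])).1
        ((d.getD u []).foldl (solveEdgeA (dist.getD u 0)) (mc, [])).1
        hmeas hG3 hG4 hK3' hK4' hK5'
      rw [← hFeq] at hIH
      -- items bookkeeping
      obtain ⟨rest, hrest⟩ := (bfsLoop_ext d (qt ++ ns)
        ((d.getD u []).foldl (bfsEdge (dist.getD u 0)) (dist, [])).1).1
      rw [← hFeq] at hrest
      have hdrop1 : (bfsLoop d (u :: qt) dist).items.drop dist.size =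
          ns.map (fun v => (v, dist.getD u 0 + 1)) ++ rest := by
        rw [hrest, h2, List.append_assoc]
        exact List.drop_left
      have hdrop2 : (bfsLoop d (u :: qt) dist).items.drop
          ((d.getD u []).foldl (bfsEdge (dist.getD u 0)) (dist, [])).1.size = rest := by
        rw [hrest]
        exact List.drop_left
      rw [hdrop2] at hIH
      -- assemble
      rw [List.map_cons, solveLoop, hG2, hqmap, hnsmap, ← List.map_append, hIH,
        List.cons_append, List.foldl_cons, hdrop1, hnsmap, List.map_append,
        List.append_assoc, ← hG1]

-- ===== VERDICT (by name: the statement is the Claim_ definition above) =====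
theorem solve_spec : Claim_equal_solve := by
  intro adj _ _
  unfold Spec_solve solve solve_alt
  have hmain := main_sim (PySem.Dict.ofList adj)
    (2 * pvCnt (pvUniv (PySem.Dict.ofList adj)) (PySem.Dict.ofList [("English", (0 : Int))]) + 1)
    ["English"] (PySem.Dict.ofList [("English", (0 : Int))])
    (PySem.Dict.ofList [("English", ((0 : Int), (0 : Int)))])
    (by simp)
    ?_ ?_ ?_ ?_ ?_
  · obtain ⟨rest, hrest⟩ := (bfsLoop_ext (PySem.Dict.ofList adj) ["English"]
      (PySem.Dict.ofList [("English", (0 : Int))])).1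
    have hmap : (["English"].map (fun u =>
        (u, (PySem.Dict.ofList [("English", (0 : Int))]).getD u 0))) = [("English", (0 : Int))] := rfl
    rw [hmap] at hmain
    have hitems : (bfsLoop (PySem.Dict.ofList adj) ["English"]
        (PySem.Dict.ofList [("English", (0 : Int))])).items = ("English", (0 : Int)) :: rest := by
      rw [hrest]; rfl
    have hlist : ([("English", (0 : Int))] ++ (bfsLoop (PySem.Dict.ofList adj) ["English"]
        (PySem.Dict.ofList [("English", (0 : Int))])).items.drop
          (PySem.Dict.ofList [("English", (0 : Int))]).size) =
        (bfsLoop (PySem.Dict.ofList adj) ["English"]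
          (PySem.Dict.ofList [("English", (0 : Int))])).items := by
      rw [hitems]
      rfl
    rw [hlist] at hmain
    exact congrArg PySem.Dict.items hmain
  · -- same key sets in the two initial dicts
    intro v
    rfl
  · -- initial steps component agrees with the initial distances
    intro v p hp
    rw [show (PySem.Dict.ofList [("English", ((0 : Int), (0 : Int)))]) =
      PySem.Dict.mk [("English", (0, 0))] from rfl, PySem.Dict.get?_mk_cons] at hp
    rw [show (PySem.Dict.ofList [("English", (0 : Int))]) =
      PySem.Dict.mk [("English", 0)] from rfl, PySem.Dict.get?_mk_cons]
    by_cases hv : ("English" == v) = true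
    · rw [if_pos hv] at hp
      rw [if_pos hv]
      cases hp
      rfl
    · rw [if_neg hv] at hp
      cases hp
  · -- the queue is inside the initial dict
    intro v hv
    rcases List.mem_singleton.mp hv with rfl
    rfl
  · -- singleton queue is trivially sorted
    simp
  · -- every initial distance is at most dist[head] + 1
    intro u0 hu0 v o hvo
    have : u0 = "English" := by
      simp only [List.head?_cons, Option.some.injEq] at hu0
      exact hu0.symm
    subst this
    rw [show (PySem.Dict.ofList [("English", (0 : Int))]) =
      PySem.Dict.mk [("English", 0)] from rfl, PySem.Dict.get?_mk_cons] at hvo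
    by_cases hv : ("English" == v) = true
    · rw [if_pos hv] at hvo
      cases hvo
      decide
    · rw [if_neg hv] at hvo
      cases hvo
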